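-- pv_equiv track=rewrite | github.com/namratapadmanabhan/15112termproject | aiPlayerCheck.py | determineOtherWords
-- ===== SOURCE A (Python) =====
-- def determineOtherWords(possibleWord, cell, filledCells):
--     boardPositions = [cell]
--     currPos = cell
--     boardLength = 15
--     beginningBoard = 0
--     endBoard = 14
--     if possibleWord:
--         while (currPos + boardLength) in filledCells:
--             currPos += boardLength
--             boardPositions.append(currPos)
--         currPos = cell
--         while (currPos - boardLength) in filledCells:
--             currPos -= boardLength
--             boardPositions.insert(beginningBoard, currPos)
--     else:
--         while ((currPos + 1) in filledCells) and (currPos % boardLength != endBoard):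
--             currPos += 1
--             boardPositions.append(currPos)
--         currPos = cell
--         while ((currPos - 1) in filledCells) and (currPos % boardLength != beginningBoard):
--             currPos -= 1
--             boardPositions.insert(beginningBoard, currPos)
--     if boardPositions == [cell]:
--         return []
--     return boardPositions
-- ===== SOURCE B (Python) =====
-- def determineOtherWords(possibleWord, cell, filledCells):
--     # Declarative reformulation: restrict the filled cells to the line through
--     # `cell` (same column, or same 15-wide row), then keep exactly those
--     # positions whose whole interval back to `cell` lies in that set, and sort.
--     step = 15 if possibleWord else 1
--     if possibleWord:
--         aligned = {c for c in filledCells if (c - cell) % 15 == 0}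
--     else:
--         aligned = {c for c in filledCells if c // 15 == cell // 15}
--     aligned.add(cell)
--     word = sorted(p for p in aligned
--                   if all(q in aligned
--                          for q in range(min(p, cell), max(p, cell) + 1, step)))
--     return word if len(word) > 1 else []
-- ===== Notes on version B (the rewrite author's own statement) =====
-- stated objective: alternative
-- what changed: B replaces A's stateful outward scans from cell with a declarative set formulation: restrict filledCells to the line through cell (same column, or same 15-wide row), keep the positions whose whole interval back to cell lies in that set, and sort the result.
import Mathlib
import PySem

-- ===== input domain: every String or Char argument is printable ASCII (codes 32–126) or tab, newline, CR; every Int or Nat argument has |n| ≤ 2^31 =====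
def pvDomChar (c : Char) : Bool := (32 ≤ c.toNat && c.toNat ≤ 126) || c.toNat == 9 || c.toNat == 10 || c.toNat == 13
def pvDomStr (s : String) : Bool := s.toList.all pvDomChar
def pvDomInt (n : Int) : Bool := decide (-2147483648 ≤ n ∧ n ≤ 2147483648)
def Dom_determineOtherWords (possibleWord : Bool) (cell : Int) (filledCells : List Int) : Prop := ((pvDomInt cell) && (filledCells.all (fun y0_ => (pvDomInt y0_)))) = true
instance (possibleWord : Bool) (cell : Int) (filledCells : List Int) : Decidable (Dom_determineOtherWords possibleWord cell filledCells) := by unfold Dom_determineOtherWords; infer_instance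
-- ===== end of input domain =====

-- B drops A's stateful outward scans: it restricts filledCells to the line through cell,
-- keeps the positions whose whole interval back to cell lies in that set, and sorts
-- (alternative declarative algorithm, same result).
-- A-port fuel (filledCells.length + 1) only makes the while-loops total: each iteration
-- visits a fresh member of filledCells, so the fuel is never exhausted (proved below).

-- ===== PORT A =====
-- A's forward while-loop: append currPos+st while the condition holds at currPos.
def pvAFwd (st : Int) (cond : Int → Bool) : Nat → Int → List Int → List Int
  | 0, _, acc => acc
  | f + 1, pos, acc =>
    if cond pos then pvAFwd st cond f (pos + st) (acc ++ [pos + st]) else acc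

-- A's backward while-loop: insert currPos-st at position 0 while the condition holds.
def pvABack (st : Int) (cond : Int → Bool) : Nat → Int → List Int → List Int
  | 0, _, acc => acc
  | f + 1, pos, acc =>
    if cond pos then pvABack st cond f (pos - st) ((pos - st) :: acc) else acc

def determineOtherWords (possibleWord : Bool) (cell : Int) (filledCells : List Int) : List Int :=
  let fuel := filledCells.length + 1
  let boardPositions :=
    if possibleWord then
      let l1 := pvAFwd 15 (fun p => filledCells.contains (p + 15)) fuel cell [cell]
      pvABack 15 (fun p => filledCells.contains (p - 15)) fuel cell l1
    else
      let l1 := pvAFwd 1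
        (fun p => filledCells.contains (p + 1) && !(PySem.Int.mod p 15 == 14)) fuel cell [cell]
      pvABack 1
        (fun p => filledCells.contains (p - 1) && !(PySem.Int.mod p 15 == 0)) fuel cell l1
  if boardPositions = [cell] then [] else boardPositions

-- ===== PORT B =====
def determineOtherWords_alt (possibleWord : Bool) (cell : Int) (filledCells : List Int) : List Int :=
  let step : Int := if possibleWord then 15 else 1
  let aligned0 : PySem.Set Int :=
    if possibleWord then
      PySem.Set.ofList (filledCells.filter (fun c => PySem.Int.mod (c - cell) 15 == 0))
    else
      PySem.Set.ofList (filledCells.filter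
        (fun c => PySem.Int.floordiv c 15 == PySem.Int.floordiv cell 15))
  let aligned := PySem.Set.add aligned0 cell
  let word := PySem.List.sorted
    (aligned.filter (fun p =>
      (PySem.List.pyRange (min p cell) (max p cell + 1) step).all
        (fun q => PySem.Set.contains aligned q)))
    (fun x => x)
  if word.length > 1 then word else []

-- ===== PRECONDITION & SPEC =====
def Spec_determineOtherWords (possibleWord : Bool) (cell : Int) (filledCells : List Int) (out : List Int) : Prop := out = determineOtherWords_alt possibleWord cell filledCells
instance (possibleWord : Bool) (cell : Int) (filledCells : List Int) (out : List Int) : Decidable (Spec_determineOtherWords possibleWord cell filledCells out) := by unfold Spec_determineOtherWords; infer_instance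

-- ===== CLAIM (what is proved, stated in full; the proofs are below) =====
def Claim_equal_determineOtherWords : Prop := ∀ (possibleWord : Bool) (cell : Int) (filledCells : List Int), Dom_determineOtherWords possibleWord cell filledCells → Spec_determineOtherWords possibleWord cell filledCells (determineOtherWords possibleWord cell filledCells)

-- ===== LEMMAS AND PROOFS =====
def pvProg (st a : Int) (k : Nat) : List Int :=
  (List.range k).map (fun (i : Nat) => a + st * (i : Int))

theorem pvProg_zero (st a : Int) : pvProg st a 0 = [] := rfl

theorem pvProg_succ (st a : Int) (k : Nat) :
    pvProg st a (k + 1) = pvProg st a k ++ [a + st * k] := by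
  simp [pvProg, List.range_succ]

theorem pvProg_cons (st a : Int) (k : Nat) :
    pvProg st a (k + 1) = a :: pvProg st (a + st) k := by
  simp only [pvProg, List.range_succ_eq_map, List.map_cons, List.map_map, Nat.cast_zero,
    mul_zero, add_zero]
  congr 1
  apply List.map_congr_left
  intro i _
  simp only [Function.comp_apply]
  push_cast
  ring

theorem pvProg_add (st a : Int) (m n : Nat) :
    pvProg st a (m + n) = pvProg st a m ++ pvProg st (a + st * m) n := by
  induction n with
  | zero => simp [pvProg_zero]
  | succ n ih =>
    have h : a + st * ((m + n : Nat) : Int) = a + st * m + st * n := by push_cast; ring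
    rw [← Nat.add_assoc, pvProg_succ, ih, pvProg_succ, List.append_assoc, h]

theorem pvProg_length (st a : Int) (k : Nat) : (pvProg st a k).length = k := by
  simp [pvProg]

theorem pvProg_mem (st a : Int) (k : Nat) (x : Int) :
    x ∈ pvProg st a k ↔ ∃ i : Nat, i < k ∧ a + st * (i : Int) = x := by
  simp [pvProg]

theorem pvProg_pairwise (st a : Int) (hst : 0 < st) (k : Nat) :
    (pvProg st a k).Pairwise (· < ·) := by
  unfold pvProg
  refine List.Pairwise.map _ ?_ List.pairwise_lt_range
  intro i j hij
  have : (i : Int) < (j : Int) := by exact_mod_cast hij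
  have := mul_lt_mul_of_pos_left this hst
  omega

theorem pvProg_nodup (st a : Int) (hst : 0 < st) (k : Nat) : (pvProg st a k).Nodup :=
  (pvProg_pairwise st a hst k).imp ne_of_lt

-- A's forward loop appends an arithmetic progression; the number of steps is maximal
-- w.r.t. the condition as long as the fuel was not exhausted.
theorem pvAFwd_spec (st : Int) (cond : Int → Bool) (f : Nat) (pos : Int) (acc : List Int) :
    ∃ k : Nat, pvAFwd st cond f pos acc = acc ++ pvProg st (pos + st) k ∧
      (∀ j : Nat, j < k → cond (pos + st * j) = true) ∧
      (k < f → cond (pos + st * k) = false) := by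
  induction f generalizing pos acc with
  | zero => exact ⟨0, by simp [pvAFwd, pvProg_zero], by omega, by omega⟩
  | succ f ih =>
    by_cases h : cond pos = true
    · obtain ⟨k, he, hall, hmax⟩ := ih (pos + st) (acc ++ [pos + st])
      refine ⟨k + 1, ?_, ?_, ?_⟩
      · simp only [pvAFwd, h, if_pos, he]
        rw [pvProg_cons, List.append_assoc, List.singleton_append]
      · intro j hj
        cases j with
        | zero => simpa using h
        | succ j =>
          have := hall j (by omega)
          have harg : pos + st + st * (j : Int) = pos + st * ((j : Nat) + 1 : Nat) := by
            push_cast; ring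
          rwa [harg] at this
      · intro hk
        have := hmax (by omega)
        have harg : pos + st + st * (k : Int) = pos + st * ((k : Nat) + 1 : Nat) := by
          push_cast; ring
        rwa [harg] at this
    · refine ⟨0, by simp [pvAFwd, h, pvProg_zero], by omega, ?_⟩
      intro _
      simpa using h

theorem pvABack_spec (st : Int) (cond : Int → Bool) (f : Nat) (pos : Int) (acc : List Int) :
    ∃ k : Nat, pvABack st cond f pos acc = pvProg st (pos - st * k) k ++ acc ∧
      (∀ j : Nat, j < k → cond (pos - st * j) = true) ∧
      (k < f → cond (pos - st * k) = false) := by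
  induction f generalizing pos acc with
  | zero => exact ⟨0, by simp [pvABack, pvProg_zero], by omega, by omega⟩
  | succ f ih =>
    by_cases h : cond pos = true
    · obtain ⟨k, he, hall, hmax⟩ := ih (pos - st) ((pos - st) :: acc)
      refine ⟨k + 1, ?_, ?_, ?_⟩
      · simp only [pvABack, h, if_pos, he]
        have h2 : pos - st - st * (k : Int) = pos - st * ((k : Nat) + 1 : Nat) := by
          push_cast; ring
        have h1 : pos - st * ((k : Nat) + 1 : Nat) + st * (k : Int) = pos - st := by
          push_cast; ring
        rw [h2, pvProg_succ, h1, List.append_assoc, List.singleton_append]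
      · intro j hj
        cases j with
        | zero => simpa using h
        | succ j =>
          have := hall j (by omega)
          have harg : pos - st - st * (j : Int) = pos - st * ((j : Nat) + 1 : Nat) := by
            push_cast; ring
          rwa [harg] at this
      · intro hk
        have := hmax (by omega)
        have harg : pos - st - st * (k : Int) = pos - st * ((k : Nat) + 1 : Nat) := by
          push_cast; ring
        rwa [harg] at this
    · refine ⟨0, by simp [pvABack, h, pvProg_zero], by omega, ?_⟩
      intro _
      simpa using h

-- k distinct visited cells all lie in L, so k ≤ L.length (the fuel is never exhausted).
theorem pvSteps_le (st pos : Int) (hst : st ≠ 0) (L : List Int) (k : Nat)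
    (h : ∀ j : Nat, j < k → (pos + st * ((j : Int) + 1)) ∈ L) : k ≤ L.length := by
  have hnd : ((List.range k).map (fun (j : Nat) => pos + st * ((j : Int) + 1))).Nodup := by
    refine List.Nodup.map_on ?_ List.nodup_range
    intro i _ j _ hij
    have : st * ((i : Int) + 1) = st * ((j : Int) + 1) := by omega
    have := mul_left_cancel₀ hst this
    omega
  have hsub : ((List.range k).map (fun (j : Nat) => pos + st * ((j : Int) + 1))).toFinset
      ⊆ L.toFinset := by
    intro x hx
    rw [List.mem_toFinset] at hx ⊢
    obtain ⟨j, hj, rfl⟩ := List.mem_map.mp hx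
    exact h j (List.mem_range.mp hj)
  have := Finset.card_le_card hsub
  rw [List.toFinset_card_of_nodup hnd] at this
  simpa using this.trans (List.toFinset_card_le L)

-- The core equivalence, parameterised over the step and the line/boundary predicates.
theorem pvCore (st cell : Int) (filled : List Int) (alignedB gF gB condF condB : Int → Bool)
    (hst : 0 < st)
    (hA : alignedB cell = true)
    (hcF : ∀ p, condF p = (filled.contains (p + st) && gF p))
    (hcB : ∀ p, condB p = (filled.contains (p - st) && gB p))
    (hF : ∀ p, alignedB p = true → alignedB (p + st) = gF p)
    (hBk : ∀ p, alignedB p = true → alignedB (p - st) = gB p)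
    (hDiv : ∀ p, alignedB p = true → st ∣ p - cell) :
    (if pvABack st condB (filled.length + 1) cell
          (pvAFwd st condF (filled.length + 1) cell [cell]) = [cell] then []
     else pvABack st condB (filled.length + 1) cell
          (pvAFwd st condF (filled.length + 1) cell [cell]))
    = (if (PySem.List.sorted
            ((PySem.Set.add (PySem.Set.ofList (filled.filter alignedB)) cell).filter (fun p =>
              (PySem.List.pyRange (min p cell) (max p cell + 1) st).all
                (fun q => PySem.Set.contains
                  (PySem.Set.add (PySem.Set.ofList (filled.filter alignedB)) cell) q)))
            (fun x => x)).length > 1 then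
         PySem.List.sorted
            ((PySem.Set.add (PySem.Set.ofList (filled.filter alignedB)) cell).filter (fun p =>
              (PySem.List.pyRange (min p cell) (max p cell + 1) st).all
                (fun q => PySem.Set.contains
                  (PySem.Set.add (PySem.Set.ofList (filled.filter alignedB)) cell) q)))
            (fun x => x)
       else []) := by
  obtain ⟨kf, hfe, hfc, hfmax'⟩ := pvAFwd_spec st condF (filled.length + 1) cell [cell]
  obtain ⟨kb, hbe, hbc, hbmax'⟩ :=
    pvABack_spec st condB (filled.length + 1) cell
      (pvAFwd st condF (filled.length + 1) cell [cell])
  have hkf : kf ≤ filled.length := by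
    refine pvSteps_le st cell (ne_of_gt hst) filled kf ?_
    intro j hj
    have hc := hfc j hj
    rw [hcF] at hc
    have hmem := List.contains_iff_mem.mp (Bool.and_elim_left hc)
    have harg : cell + st * (j : Int) + st = cell + st * ((j : Int) + 1) := by ring
    rwa [harg] at hmem
  have hkb : kb ≤ filled.length := by
    refine pvSteps_le (-st) cell (by omega) filled kb ?_
    intro j hj
    have hc := hbc j hj
    rw [hcB] at hc
    have hmem := List.contains_iff_mem.mp (Bool.and_elim_left hc)
    have harg : cell - st * (j : Int) - st = cell + (-st) * ((j : Int) + 1) := by ring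
    rwa [harg] at hmem
  have hfmax : condF (cell + st * kf) = false := hfmax' (by omega)
  have hbmax : condB (cell - st * kb) = false := hbmax' (by omega)
  have hbp : pvABack st condB (filled.length + 1) cell
      (pvAFwd st condF (filled.length + 1) cell [cell])
      = pvProg st (cell - st * kb) (kb + kf + 1) := by
    rw [hbe, hfe]
    have h1 : kb + kf + 1 = kb + (kf + 1) := by omega
    rw [h1, pvProg_add]
    have h2 : cell - st * (kb : Int) + st * (kb : Int) = cell := by ring
    rw [h2, pvProg_cons]
    rfl
  set S : PySem.Set Int := (PySem.Set.ofList (filled.filter alignedB)).add cell with hSdef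
  set Pb : Int → Bool := fun p =>
    (PySem.List.pyRange (min p cell) (max p cell + 1) st).all
      (fun q => PySem.Set.contains S q) with hPbdef
  have hSmem : ∀ x : Int, x ∈ S ↔ (x ∈ filled ∧ alignedB x = true) ∨ x = cell := by
    intro x
    rw [hSdef, PySem.Set.mem_add, PySem.Set.mem_ofList, List.mem_filter]
  have hSal : ∀ x ∈ S, alignedB x = true := by
    intro x hx
    rcases (hSmem x).mp hx with ⟨_, h⟩ | rfl
    · exact h
    · exact hA
  have hUp : ∀ j : Nat, j ≤ kf → (cell + st * (j : Int)) ∈ S := by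
    intro j
    induction j with
    | zero =>
      intro _
      simpa using (hSmem cell).mpr (Or.inr rfl)
    | succ j ih =>
      intro hj
      have hjS := ih (by omega)
      have hcond := hfc j (by omega)
      rw [hcF] at hcond
      have hmem := Bool.and_elim_left hcond
      have hg := Bool.and_elim_right hcond
      have hmem' := List.contains_iff_mem.mp hmem
      have hal : alignedB (cell + st * (j : Int) + st) = gF (cell + st * (j : Int)) :=
        hF _ (hSal _ hjS)
      rw [hg] at hal
      have harg : cell + st * ((j + 1 : Nat) : Int) = cell + st * (j : Int) + st := by
        push_cast; ring
      rw [harg]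
      exact (hSmem _).mpr (Or.inl ⟨hmem', hal⟩)
  have hDown : ∀ j : Nat, j ≤ kb → (cell - st * (j : Int)) ∈ S := by
    intro j
    induction j with
    | zero =>
      intro _
      simpa using (hSmem cell).mpr (Or.inr rfl)
    | succ j ih =>
      intro hj
      have hjS := ih (by omega)
      have hcond := hbc j (by omega)
      rw [hcB] at hcond
      have hmem := Bool.and_elim_left hcond
      have hg := Bool.and_elim_right hcond
      have hmem' := List.contains_iff_mem.mp hmem
      have hal : alignedB (cell - st * (j : Int) - st) = gB (cell - st * (j : Int)) :=
        hBk _ (hSal _ hjS)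
      rw [hg] at hal
      have harg : cell - st * ((j + 1 : Nat) : Int) = cell - st * (j : Int) - st := by
        push_cast; ring
      rw [harg]
      exact (hSmem _).mpr (Or.inl ⟨hmem', hal⟩)
  have hPt : ∀ u : Int, -(kb : Int) ≤ u → u ≤ (kf : Int) → (cell + st * u) ∈ S := by
    intro u h1 h2
    rcases le_or_gt 0 u with hu | hu
    · have := hUp u.toNat (by omega)
      rwa [Int.toNat_of_nonneg hu] at this
    · have := hDown (-u).toNat (by omega)
      have harg : cell - st * (((-u).toNat : Nat) : Int) = cell + st * u := by
        rw [Int.toNat_of_nonneg (by omega : (0:Int) ≤ -u)]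
        ring
      rwa [harg] at this
  have hmin : ∀ u : Int, min (cell + st * u) cell = cell + st * (min u 0) := by
    intro u
    rcases le_total u 0 with h | h
    · have hm : st * u ≤ 0 := mul_nonpos_of_nonneg_of_nonpos hst.le h
      rw [min_eq_left (h := h), min_eq_left (by omega : cell + st * u ≤ cell)]
    · have hm : 0 ≤ st * u := mul_nonneg hst.le h
      rw [min_eq_right (h := h), min_eq_right (by omega : cell ≤ cell + st * u)]
      ring
  have hmax : ∀ u : Int, max (cell + st * u) cell = cell + st * (max u 0) := by
    intro u
    rcases le_total u 0 with h | h
    · have hm : st * u ≤ 0 := mul_nonpos_of_nonneg_of_nonpos hst.le h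
      rw [max_eq_right (h := h), max_eq_right (by omega : cell + st * u ≤ cell)]
      ring
    · have hm : 0 ≤ st * u := mul_nonneg hst.le h
      rw [max_eq_left (h := h), max_eq_left (by omega : cell ≤ cell + st * u)]
  have hRangeS : ∀ m : Int, -(kb : Int) ≤ m → m ≤ (kf : Int) → ∀ q : Int,
      q ∈ PySem.List.pyRange (min (cell + st * m) cell) (max (cell + st * m) cell + 1) st →
      q ∈ S := by
    intro m h1 h2 q hq
    rw [PySem.List.mem_pyRange_iff_of_pos hst] at hq
    obtain ⟨hq1, hq2, c, hc⟩ := hq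
    rw [hmin m] at hq1 hc
    rw [hmax m] at hq2
    have hexp : st * (min m 0 + c) = st * (min m 0) + st * c := by ring
    have hq' : q = cell + st * (min m 0 + c) := by linarith
    have hc0 : (0 : Int) ≤ c := by
      have h0 : st * (0 : Int) ≤ st * c := by
        rw [mul_zero]; linarith
      exact le_of_mul_le_mul_left h0 hst
    have hcu : min m 0 + c ≤ max m 0 := by
      have hle : st * (min m 0 + c) ≤ st * (max m 0) := by linarith
      exact le_of_mul_le_mul_left hle hst
    have hlo : -(kb : Int) ≤ min m 0 + c := by
      have := le_min h1 (by omega : -(kb : Int) ≤ 0)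
      omega
    have hhi : min m 0 + c ≤ (kf : Int) := by
      have := max_le h2 (by omega : (0 : Int) ≤ (kf : Int))
      omega
    rw [hq']
    exact hPt _ hlo hhi
  have hProgIff : ∀ x : Int, (x ∈ S ∧ Pb x = true)
      ↔ x ∈ pvProg st (cell - st * kb) (kb + kf + 1) := by
    intro x
    constructor
    · rintro ⟨hxS, hall⟩
      rw [hPbdef, List.all_eq_true] at hall
      have hallS : ∀ q ∈ PySem.List.pyRange (min x cell) (max x cell + 1) st, q ∈ S := by
        intro q hq
        exact (PySem.Set.contains_iff S q).mp (hall q hq)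
      obtain ⟨m, hm⟩ := hDiv x (hSal x hxS)
      have hx : x = cell + st * m := by linarith
      have hmemrange : ∀ u : Int, min m 0 ≤ u → u ≤ max m 0 → (cell + st * u) ∈ S := by
        intro u h1 h2
        apply hallS
        rw [hx, hmin m, hmax m, PySem.List.mem_pyRange_iff_of_pos hst]
        have hl : st * (min m 0) ≤ st * u := mul_le_mul_of_nonneg_left h1 hst.le
        have hr : st * u ≤ st * (max m 0) := mul_le_mul_of_nonneg_left h2 hst.le
        exact ⟨by omega, by omega, ⟨u - min m 0, by ring⟩⟩
      rcases lt_trichotomy m 0 with hm0 | hm0 | hm0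
      · -- x below cell: the backward condition holds all the way to x
        have hcb : ∀ j : Nat, (j : Int) < -m → condB (cell - st * (j : Int)) = true := by
          intro j hj
          have hpS : (cell + st * (-(j : Int))) ∈ S :=
            hmemrange _ (le_trans (min_le_left _ _) (by omega))
              (le_trans (by omega) (le_max_right _ _))
          have hqS : (cell + st * (-((j : Int) + 1))) ∈ S :=
            hmemrange _ (le_trans (min_le_left _ _) (by omega))
              (le_trans (by omega) (le_max_right _ _))
          have hp' : (cell - st * (j : Int)) ∈ S := by
            have harg : cell + st * (-(j : Int)) = cell - st * (j : Int) := by ring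
            rwa [harg] at hpS
          have hq' : (cell - st * ((j : Int) + 1)) ∈ S := by
            have harg : cell + st * (-((j : Int) + 1)) = cell - st * ((j : Int) + 1) := by ring
            rwa [harg] at hqS
          have hal : alignedB (cell - st * (j : Int) - st) = gB (cell - st * (j : Int)) :=
            hBk _ (hSal _ hp')
          have harg2 : cell - st * (j : Int) - st = cell - st * ((j : Int) + 1) := by ring
          rw [harg2, hSal _ hq'] at hal
          have hqf : (cell - st * ((j : Int) + 1)) ∈ filled := by
            rcases (hSmem _).mp hq' with ⟨h, _⟩ | hcq
            · exact h
            · exfalso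
              have hz : st * ((j : Int) + 1) = 0 := by linarith
              have hpos : (0 : Int) < st * ((j : Int) + 1) :=
                mul_pos hst (by positivity)
              omega
          rw [hcB, Bool.and_eq_true]
          refine ⟨List.contains_iff_mem.mpr ?_, hal.symm⟩
          rwa [harg2]
        have hmkb : -m ≤ (kb : Int) := by
          by_contra hcon
          rw [not_le] at hcon
          have := hcb kb (by omega)
          rw [hbmax] at this
          exact Bool.false_ne_true this
        rw [pvProg_mem]
        refine ⟨kb - (-m).toNat, by omega, ?_⟩
        have h1 : ((kb - (-m).toNat : Nat) : Int) = (kb : Int) + m := by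
          have := Int.toNat_of_nonneg (show (0:Int) ≤ -m by omega)
          omega
        rw [h1, hx]
        ring
      · rw [pvProg_mem]
        refine ⟨kb, by omega, ?_⟩
        rw [hx, hm0]
        ring
      · -- x above cell: the forward condition holds all the way to x
        have hcf : ∀ j : Nat, (j : Int) < m → condF (cell + st * (j : Int)) = true := by
          intro j hj
          have hp' : (cell + st * (j : Int)) ∈ S :=
            hmemrange _ (le_trans (min_le_right _ _) (by omega))
              (le_trans (by omega) (le_max_left _ _))
          have hq' : (cell + st * ((j : Int) + 1)) ∈ S :=
            hmemrange _ (le_trans (min_le_right _ _) (by omega))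
              (le_trans (by omega) (le_max_left _ _))
          have hal : alignedB (cell + st * (j : Int) + st) = gF (cell + st * (j : Int)) :=
            hF _ (hSal _ hp')
          have harg2 : cell + st * (j : Int) + st = cell + st * ((j : Int) + 1) := by ring
          rw [harg2, hSal _ hq'] at hal
          have hqf : (cell + st * ((j : Int) + 1)) ∈ filled := by
            rcases (hSmem _).mp hq' with ⟨h, _⟩ | hcq
            · exact h
            · exfalso
              have hz : st * ((j : Int) + 1) = 0 := by linarith
              have hpos : (0 : Int) < st * ((j : Int) + 1) :=
                mul_pos hst (by positivity)
              omega
          rw [hcF, Bool.and_eq_true]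
          refine ⟨List.contains_iff_mem.mpr ?_, hal.symm⟩
          rwa [harg2]
        have hmkf : m ≤ (kf : Int) := by
          by_contra hcon
          rw [not_le] at hcon
          have := hcf kf (by omega)
          rw [hfmax] at this
          exact Bool.false_ne_true this
        rw [pvProg_mem]
        refine ⟨kb + m.toNat, by omega, ?_⟩
        have h1 : ((kb + m.toNat : Nat) : Int) = (kb : Int) + m := by
          have := Int.toNat_of_nonneg (show (0:Int) ≤ m by omega)
          omega
        rw [h1, hx]
        ring
    · intro hxp
      rw [pvProg_mem] at hxp
      obtain ⟨i, hi, hix⟩ := hxp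
      have hexp : st * ((i : Int) - kb) = st * (i : Int) - st * (kb : Int) := by ring
      have hu : x = cell + st * ((i : Int) - kb) := by linarith
      constructor
      · rw [hu]
        exact hPt _ (by omega) (by omega)
      · rw [hPbdef, List.all_eq_true]
        intro q hq
        rw [PySem.Set.contains_iff]
        rw [hu] at hq
        exact hRangeS ((i : Int) - kb) (by omega) (by omega) q hq
  have hNod : S.Nodup := PySem.Set.nodup_add _ _ (PySem.Set.nodup_ofList _)
  have hperm : (pvProg st (cell - st * kb) (kb + kf + 1)).Perm (S.filter Pb) := by
    rw [List.perm_ext_iff_of_nodup (pvProg_nodup st _ hst _) (List.Nodup.filter _ hNod)]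
    intro a
    rw [List.mem_filter]
    exact (hProgIff a).symm
  have hsorted : PySem.List.sorted (S.filter Pb) (fun x => x)
      = pvProg st (cell - st * kb) (kb + kf + 1) :=
    PySem.List.sorted_eq_of_perm_of_pairwise_lt _ _ _ hperm (pvProg_pairwise st _ hst _)
  rw [hbp, hsorted]
  by_cases hk : kb + kf = 0
  · have hkb0 : kb = 0 := by omega
    have hkf0 : kf = 0 := by omega
    subst hkb0
    have hone : pvProg st (cell - st * ((0:Nat) : Int)) (0 + kf + 1) = [cell] := by
      rw [hkf0, pvProg_cons, pvProg_zero]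
      norm_num
    rw [hone]
    simp
  · have hlen : (pvProg st (cell - st * kb) (kb + kf + 1)).length = kb + kf + 1 :=
      pvProg_length _ _ _
    have hne : pvProg st (cell - st * kb) (kb + kf + 1) ≠ [cell] := by
      intro h
      have := congrArg List.length h
      rw [hlen] at this
      simp at this
      omega
    rw [if_neg hne, if_pos (by rw [hlen]; omega)]

-- ===== VERDICT (by name: the statement is the Claim_ definition above) =====
theorem determineOtherWords_spec : Claim_equal_determineOtherWords := by
  intro possibleWord cell filledCells _
  unfold Spec_determineOtherWords
  cases possibleWord
  · show determineOtherWords false cell filledCells = determineOtherWords_alt false cell filledCells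
    simp only [determineOtherWords, determineOtherWords_alt, Bool.false_eq_true, if_false]
    refine pvCore 1 cell filledCells
      (fun c => PySem.Int.floordiv c 15 == PySem.Int.floordiv cell 15)
      (fun p => !(PySem.Int.mod p 15 == 14)) (fun p => !(PySem.Int.mod p 15 == 0))
      _ _ one_pos (by simp) (fun p => rfl) (fun p => rfl) ?_ ?_ (fun p _ => one_dvd _)
    · intro p hp
      simp only [beq_iff_eq,
        PySem.Int.floordiv_eq_ediv_of_pos (show (0:Int) < 15 by norm_num)] at hp
      simp only [PySem.Int.floordiv_eq_ediv_of_pos (show (0:Int) < 15 by norm_num),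
        PySem.Int.mod_eq_emod_of_pos (show (0:Int) < 15 by norm_num)]
      rw [Bool.eq_iff_iff]
      simp only [beq_iff_eq, Bool.not_eq_true', beq_eq_false_iff_ne, ne_eq]
      omega
    · intro p hp
      simp only [beq_iff_eq,
        PySem.Int.floordiv_eq_ediv_of_pos (show (0:Int) < 15 by norm_num)] at hp
      simp only [PySem.Int.floordiv_eq_ediv_of_pos (show (0:Int) < 15 by norm_num),
        PySem.Int.mod_eq_emod_of_pos (show (0:Int) < 15 by norm_num)]
      rw [Bool.eq_iff_iff]
      simp only [beq_iff_eq, Bool.not_eq_true', beq_eq_false_iff_ne, ne_eq]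
      omega
  · show determineOtherWords true cell filledCells = determineOtherWords_alt true cell filledCells
    simp only [determineOtherWords, determineOtherWords_alt, if_true]
    refine pvCore 15 cell filledCells
      (fun c => PySem.Int.mod (c - cell) 15 == 0)
      (fun _ => true) (fun _ => true) _ _ (by norm_num)
      (by simp)
      (fun p => (Bool.and_true _).symm) (fun p => (Bool.and_true _).symm) ?_ ?_ ?_
    · intro p hp
      simp only [beq_iff_eq,
        PySem.Int.mod_eq_emod_of_pos (show (0:Int) < 15 by norm_num)] at hp
      rw [Bool.eq_iff_iff]
      simp only [beq_iff_eq, PySem.Int.mod_eq_emod_of_pos (show (0:Int) < 15 by norm_num),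
        iff_true]
      omega
    · intro p hp
      simp only [beq_iff_eq,
        PySem.Int.mod_eq_emod_of_pos (show (0:Int) < 15 by norm_num)] at hp
      rw [Bool.eq_iff_iff]
      simp only [beq_iff_eq, PySem.Int.mod_eq_emod_of_pos (show (0:Int) < 15 by norm_num),
        iff_true]
      omega
    · intro p hp
      simp only [beq_iff_eq,
        PySem.Int.mod_eq_emod_of_pos (show (0:Int) < 15 by norm_num)] at hp
      rw [← PySem.Int.mod_eq_zero_iff_dvd, PySem.Int.mod_eq_emod_of_pos (by norm_num)]
      omega
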